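-- pv_equiv track=rewrite | github.com/kapforty/leetcode | python3/2551.py | putMarbles
-- ===== SOURCE A (Python) =====
-- from typing import List
--
-- def putMarbles(weights: List[int], k: int) -> int:
--     if k == 1:
--         return 0
--     res = []
--     for i in range(len(weights) - 1):
--         res.append(weights[i] + weights[i+1])
--     res.sort()
--     return sum(res[-k+1:]) - sum(res[:k-1])
-- ===== SOURCE B (Python) =====
-- from typing import List
--
-- def _insert_bounded(buf, x, m, asc):
--     # buf is kept sorted (ascending if asc, else descending); splice x in at
--     # its position, then drop the last element if the buffer exceeds m slots.
--     i = 0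
--     if asc:
--         while i < len(buf) and buf[i] < x:
--             i += 1
--     else:
--         while i < len(buf) and buf[i] > x:
--             i += 1
--     buf2 = buf[:i] + [x] + buf[i:]
--     if len(buf2) > m:
--         buf2.pop()
--     return buf2
--
-- def putMarbles(weights: List[int], k: int) -> int:
--     m = k - 1
--     lo = []   # the m smallest pair sums seen so far, ascending
--     hi = []   # the m largest pair sums seen so far, descending
--     for i in range(len(weights) - 1):
--         s = weights[i] + weights[i + 1]
--         lo = _insert_bounded(lo, s, m, True)
--         hi = _insert_bounded(hi, s, m, False)
--     return sum(hi) - sum(lo)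
-- ===== Notes on version B (the rewrite author's own statement) =====
-- stated objective: alternative
-- what changed: B never materialises or sorts the list of adjacent pair sums: it streams over the weights once, maintaining two size-bounded sorted buffers (the k-1 smallest pair sums ascending, the k-1 largest descending) by in-place bounded insertion, whereas A builds the full pair-sum list, sorts it and subtracts two slice sums.
-- outside the precondition, e.g. on putMarbles([1, 2, 3], 0): A returns 2, B returns 0
import Mathlib
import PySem

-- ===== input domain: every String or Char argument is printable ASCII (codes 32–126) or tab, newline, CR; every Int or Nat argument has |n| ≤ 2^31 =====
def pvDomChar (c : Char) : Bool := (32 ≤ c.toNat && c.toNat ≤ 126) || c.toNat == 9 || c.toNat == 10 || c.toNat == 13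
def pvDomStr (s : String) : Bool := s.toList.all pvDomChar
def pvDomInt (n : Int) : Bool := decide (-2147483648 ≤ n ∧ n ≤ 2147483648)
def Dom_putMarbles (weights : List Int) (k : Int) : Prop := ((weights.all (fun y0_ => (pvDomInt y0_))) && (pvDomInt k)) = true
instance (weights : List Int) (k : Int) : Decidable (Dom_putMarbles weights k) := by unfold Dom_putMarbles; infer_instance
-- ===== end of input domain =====

-- B streams over the weights once, maintaining two size-bounded sorted buffers (the k-1
-- smallest pair sums ascending, the k-1 largest descending) by bounded insertion, instead of
-- A's build-all-pair-sums, full sort and two slice sums ("alternative", not claimed faster).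

-- ===== PORT A =====
def putMarbles (weights : List Int) (k : Int) : Int :=
  if k == 1 then 0
  else
    -- res = []; for i in range(len(weights) - 1): res.append(weights[i] + weights[i+1])
    let res := (PySem.List.pyRange 0 ((weights.length : Int) - 1) 1).foldl
      (fun acc i => acc ++ [PySem.List.pyGetD weights i 0 + PySem.List.pyGetD weights (i + 1) 0]) []
    -- res.sort()
    let res := PySem.List.sorted res (fun x => x) false
    -- sum(res[-k+1:]) - sum(res[:k-1])
    (PySem.List.slice res (some (-k + 1)) none).sum - (PySem.List.slice res none (some (k - 1))).sum

-- ===== PORT B =====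
-- the position scan of _insert_bounded: `i = 0; while i < len(buf) and <p buf[i]>: i += 1`
def scanPos (p : Int → Bool) : List Int → Nat
  | [] => 0
  | y :: t => if p y then scanPos p t + 1 else 0

-- _insert_bounded(buf, x, m, asc): splice x at its sorted position, pop the last if over m
def insertBounded (buf : List Int) (x : Int) (m : Int) (asc : Bool) : List Int :=
  let i := if asc then scanPos (fun y => decide (y < x)) buf else scanPos (fun y => decide (x < y)) buf
  let buf2 := buf.take i ++ x :: buf.drop i
  if (buf2.length : Int) > m then buf2.dropLast else buf2

def putMarbles_alt (weights : List Int) (k : Int) : Int :=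
  let m := k - 1
  let st := (PySem.List.pyRange 0 ((weights.length : Int) - 1) 1).foldl
    (fun (st : List Int × List Int) i =>
      let s := PySem.List.pyGetD weights i 0 + PySem.List.pyGetD weights (i + 1) 0
      (insertBounded st.1 s m true, insertBounded st.2 s m false))
    ([], [])
  st.2.sum - st.1.sum

-- ===== PRECONDITION & SPEC =====
-- Pre_ excludes only the band 2 - len(weights) < k ≤ 0 (a non-positive bag count no caller can
-- mean): there A's negative-slice arithmetic returns an accidental nonzero value while B's
-- selection of "k-1 largest/smallest" naturally yields 0; neither value is specified.
def Pre_putMarbles (weights : List Int) (k : Int) : Prop :=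
  1 ≤ k ∨ (weights.length : Int) ≤ 1 ∨ k ≤ 2 - (weights.length : Int)
instance (weights : List Int) (k : Int) : Decidable (Pre_putMarbles weights k) := by unfold Pre_putMarbles; infer_instance
def pvWitness_putMarbles : List Int × Int := ([1, 2, 3, 4], 2)

def Spec_putMarbles (weights : List Int) (k : Int) (out : Int) : Prop := out = putMarbles_alt weights k
instance (weights : List Int) (k : Int) (out : Int) : Decidable (Spec_putMarbles weights k out) := by unfold Spec_putMarbles; infer_instance

-- ===== CLAIM (what is proved, stated in full; the proofs are below) =====
def Claim_equal_putMarbles : Prop := ∀ (weights : List Int) (k : Int), Dom_putMarbles weights k → Pre_putMarbles weights k → Spec_putMarbles weights k (putMarbles weights k)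

-- ===== LEMMAS AND PROOFS =====

-- abbreviation used only in the proofs: the ascending/descending sorts
def sA (p : List Int) : List Int := PySem.List.sorted p (fun v => v) false
def sD (p : List Int) : List Int := PySem.List.sorted p (fun v => v) true

-- recursive form of the splice at the scanned position
def insStop (q : Int → Bool) (x : Int) : List Int → List Int
  | [] => [x]
  | y :: t => if q y then x :: y :: t else y :: insStop q x t

lemma splice_eq_insStop (p : Int → Bool) (x : Int) :
    ∀ buf : List Int, buf.take (scanPos p buf) ++ x :: buf.drop (scanPos p buf)
      = insStop (fun y => !p y) x buf := by
  intro buf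
  induction buf with
  | nil => simp [scanPos, insStop]
  | cons y t ih => by_cases hp : p y <;> simp [scanPos, insStop, hp, ih]

lemma insStop_perm (q : Int → Bool) (x : Int) :
    ∀ l : List Int, (insStop q x l).Perm (x :: l) := by
  intro l
  induction l with
  | nil => simp [insStop]
  | cons y t ih =>
    unfold insStop; split_ifs
    · exact List.Perm.refl _
    · exact (ih.cons y).trans (List.Perm.swap x y t)

lemma length_insStop (q : Int → Bool) (x : Int) (l : List Int) :
    (insStop q x l).length = l.length + 1 := by
  simpa using (insStop_perm q x l).length_eq

lemma mem_insStop (q : Int → Bool) (x z : Int) (l : List Int) :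
    z ∈ insStop q x l ↔ z = x ∨ z ∈ l := by
  rw [(insStop_perm q x l).mem_iff, List.mem_cons]

lemma insStop_pairwise (r : Int → Int → Prop) (htrans : ∀ a b c, r a b → r b c → r a c) (q : Int → Bool) (x : Int)
    (hq1 : ∀ y, q y = true → r x y) (hq2 : ∀ y, q y = false → r y x) :
    ∀ l : List Int, l.Pairwise r → (insStop q x l).Pairwise r := by
  intro l
  induction l with
  | nil => intro _; simp [insStop]
  | cons y t ih =>
    intro h
    rw [List.pairwise_cons] at h
    unfold insStop; split_ifs with hq
    · refine List.pairwise_cons.mpr ⟨?_, List.pairwise_cons.mpr ⟨h.1, h.2⟩⟩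
      intro z hz
      rcases List.mem_cons.mp hz with hz | hz
      · exact hz ▸ hq1 y hq
      · exact htrans _ _ _ (hq1 y hq) (h.1 z hz)
    · refine List.pairwise_cons.mpr ⟨?_, ih h.2⟩
      intro z hz
      rcases (mem_insStop q x z t).mp hz with hz | hz
      · exact hz ▸ hq2 y (by simpa using hq)
      · exact h.1 z hz

-- truncated-buffer insertion agrees with insertion into the full list, up to take m
lemma take_insStop (q : Int → Bool) (x : Int) :
    ∀ (s : List Int) (m : Nat), (insStop q x (s.take m)).take m = (insStop q x s).take m := by
  intro s
  induction s with
  | nil => intro m; simp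
  | cons y t ih =>
    intro m
    match m with
    | 0 => simp
    | n + 1 =>
      simp only [List.take_succ_cons]
      unfold insStop; split_ifs
      · simp only [List.take_succ_cons]
        congr 1
        match n with
        | 0 => simp
        | j + 1 => simp [List.take_take]
      · simp only [List.take_succ_cons]
        congr 1
        exact ih n

-- Python's descending sort is the reverse of its ascending sort (Int: ties are equal elements).
lemma sorted_desc_eq_reverse (xs : List Int) : sD xs = (sA xs).reverse := by
  have h : sA xs = (sD xs).reverse := by
    refine PySem.List.sorted_id_eq_of_perm_of_pairwise _ _
      ((List.reverse_perm (sD xs)).trans (PySem.List.sorted_perm xs (fun v => v) true)) ?_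
    rw [List.pairwise_reverse]
    exact PySem.List.sorted_pairwise_rev xs (fun v => v)
  rw [h, List.reverse_reverse]

lemma insStop_sA (p : List Int) (x : Int) :
    insStop (fun y => !decide (y < x)) x (sA p) = sA (p ++ [x]) := by
  refine (PySem.List.sorted_id_eq_of_perm_of_pairwise _ _ ?_ ?_).symm
  · exact (insStop_perm _ x (sA p)).trans
      (((PySem.List.sorted_perm p (fun v => v) false).cons x).trans
        (List.perm_append_singleton x p).symm)
  · refine insStop_pairwise (· ≤ ·) (fun _ _ _ h1 h2 => le_trans h1 h2) _ x ?_ ?_ _ ?_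
    · intro y hy; simp at hy; omega
    · intro y hy; simp at hy; omega
    · exact PySem.List.sorted_pairwise p (fun v => v)

lemma sorted_rev_eq_of_perm_of_pairwise (xs ys : List Int) (hp : ys.Perm xs)
    (hpw : ys.Pairwise (fun a b => b ≤ a)) : sD xs = ys := by
  rw [sorted_desc_eq_reverse]
  have h : sA xs = ys.reverse := by
    refine PySem.List.sorted_id_eq_of_perm_of_pairwise _ _ ((List.reverse_perm ys).trans hp) ?_
    rw [List.pairwise_reverse]
    simpa using hpw
  rw [h, List.reverse_reverse]

lemma insStop_sD (p : List Int) (x : Int) :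
    insStop (fun y => !decide (x < y)) x (sD p) = sD (p ++ [x]) := by
  refine (sorted_rev_eq_of_perm_of_pairwise _ _ ?_ ?_).symm
  · exact (insStop_perm _ x (sD p)).trans
      (((PySem.List.sorted_perm p (fun v => v) true).cons x).trans
        (List.perm_append_singleton x p).symm)
  · refine insStop_pairwise (fun a b => b ≤ a) (fun _ _ _ h1 h2 => le_trans h2 h1) _ x ?_ ?_ _ ?_
    · intro y hy; simp at hy; omega
    · intro y hy; simp at hy; omega
    · exact PySem.List.sorted_pairwise_rev p (fun v => v)

-- the pop step: a ≤ m.toNat+1 sized buffer truncated by the `if len > m: pop()` is take m.toNat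
lemma trunc_eq_take (l : List Int) (m : Int) (h : l.length ≤ m.toNat + 1) :
    (if (l.length : Int) > m then l.dropLast else l) = l.take m.toNat := by
  split_ifs with hgt
  · rw [List.dropLast_eq_take]
    congr 1
    omega
  · rw [List.take_of_length_le]
    omega

lemma insertBounded_lo (p : List Int) (x : Int) (m : Int) :
    insertBounded ((sA p).take m.toNat) x m true = (sA (p ++ [x])).take m.toNat := by
  simp only [insertBounded, if_true]
  rw [splice_eq_insStop]
  rw [trunc_eq_take _ m (by rw [length_insStop]; have := List.length_take_le m.toNat (sA p); omega)]
  rw [take_insStop, insStop_sA]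

lemma insertBounded_hi (p : List Int) (x : Int) (m : Int) :
    insertBounded ((sD p).take m.toNat) x m false = (sD (p ++ [x])).take m.toNat := by
  simp only [insertBounded, Bool.false_eq_true, if_false]
  rw [splice_eq_insStop]
  rw [trunc_eq_take _ m (by rw [length_insStop]; have := List.length_take_le m.toNat (sD p); omega)]
  rw [take_insStop, insStop_sD]

-- the loop invariant: after the scanned indices idx, the buffers hold the m smallest /
-- m largest of the corresponding pair sums
def pairF (w : List Int) (i : Int) : Int :=
  PySem.List.pyGetD w i 0 + PySem.List.pyGetD w (i + 1) 0

lemma fold_inv_w (m : Int) (w : List Int) (idx : List Int) :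
    idx.foldl (fun (st : List Int × List Int) i =>
        (insertBounded st.1 (PySem.List.pyGetD w i 0 + PySem.List.pyGetD w (i + 1) 0) m true,
         insertBounded st.2 (PySem.List.pyGetD w i 0 + PySem.List.pyGetD w (i + 1) 0) m false))
      (([] : List Int), ([] : List Int))
      = ((sA (idx.map (pairF w))).take m.toNat, (sD (idx.map (pairF w))).take m.toNat) := by
  induction idx using List.reverseRecOn with
  | nil =>
    have h1 : sA ([] : List Int) = [] := (PySem.List.sorted_eq_nil_iff _ _ _).mpr rfl
    have h2 : sD ([] : List Int) = [] := (PySem.List.sorted_eq_nil_iff _ _ _).mpr rfl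
    simp [h1, h2]
  | append_singleton idx x ih =>
    rw [List.foldl_append, ih]
    simp only [List.foldl_cons, List.foldl_nil, List.map_append, List.map_cons, List.map_nil]
    exact Prod.ext (insertBounded_lo (idx.map (pairF w)) (pairF w x) m)
      (insertBounded_hi (idx.map (pairF w)) (pairF w x) m)

-- A's index loop builds exactly the adjacent pair sums.
lemma pairs_map (w : List Int) :
    (List.range (w.length - 1)).map (fun i : Nat => w.getD i 0 + w.getD (i + 1) 0)
      = List.zipWith (fun a b => a + b) w w.tail := by
  induction w with
  | nil => simp
  | cons a t ih =>
    cases t with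
    | nil => simp
    | cons b t' =>
      simp only [List.length_cons, Nat.add_sub_cancel, List.range_succ_eq_map,
        List.map_cons, List.map_map, List.tail_cons, List.zipWith_cons_cons]
      simp only [List.length_cons, Nat.add_sub_cancel, List.tail_cons] at ih
      refine congrArg₂ List.cons ?_ ?_
      · simp [List.getD]
      · rw [← ih]
        apply List.map_congr_left
        intro i _
        simp [List.getD]

lemma range_map_pairs (w : List Int) :
    (PySem.List.pyRange 0 ((w.length : Int) - 1) 1).map (pairF w)
      = List.zipWith (fun a b => a + b) w w.tail := by
  have hpf : pairF w = fun i => PySem.List.pyGetD w i 0 + PySem.List.pyGetD w (i + 1) 0 := rfl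
  rw [hpf, PySem.List.pyRange_one, List.map_map]
  have hn : (((w.length : Int) - 1) - 0).toNat = w.length - 1 := by omega
  rw [hn, ← pairs_map w]
  apply List.map_congr_left
  intro i _
  simp only [Function.comp_apply, zero_add]
  have h1 : ((i : Int) + 1) = ((i + 1 : Nat) : Int) := by push_cast; ring
  rw [h1, PySem.List.pyGetD_natCast, PySem.List.pyGetD_natCast]

-- B's value in closed form: sums of the (k-1)-element prefixes of the two sorts
lemma alt_closed (w : List Int) (k : Int) :
    putMarbles_alt w k
      = ((sD (List.zipWith (fun a b => a + b) w w.tail)).take (k - 1).toNat).sum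
        - ((sA (List.zipWith (fun a b => a + b) w w.tail)).take (k - 1).toNat).sum := by
  simp only [putMarbles_alt]
  rw [fold_inv_w, range_map_pairs]

-- ===== VERDICT (by name: the statement is the Claim_ definition above) =====
theorem putMarbles_spec : Claim_equal_putMarbles := by
  intro weights k _ hk
  unfold Spec_putMarbles
  simp only [putMarbles]
  rw [alt_closed]
  rw [PySem.List.foldl_append_singleton_eq_map, List.nil_append]
  rw [show (fun i => PySem.List.pyGetD weights i 0 + PySem.List.pyGetD weights (i + 1) 0)
      = pairF weights from rfl, range_map_pairs]
  set pairs := List.zipWith (fun a b => a + b) weights weights.tail with hp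
  rw [show PySem.List.sorted pairs (fun x => x) false = sA pairs from rfl]
  by_cases h1 : k = 1
  · subst h1
    norm_num
  · have hkif : (k == 1) = false := by simp [h1]
    rw [hkif]
    simp only [Bool.false_eq_true, if_false]
    by_cases hk2 : 2 ≤ k
    · -- the ordinary case: 2 ≤ k
      set m : Nat := (k - 1).toNat with hm
      have hbot : PySem.List.slice (sA pairs) none (some (k - 1)) = (sA pairs).take m := by
        rw [PySem.List.slice_to _ (by omega)]
      have htop : PySem.List.slice (sA pairs) (some (-k + 1)) none
          = (sA pairs).drop ((sA pairs).length - m) := by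
        have hneg : (-k + 1) = -((m : Int)) := by omega
        rw [hneg, ← PySem.List.slice_from_neg_natCast (sA pairs) m (by omega)]
      rw [hbot, htop, sorted_desc_eq_reverse, List.take_reverse, List.sum_reverse]
    · -- k ≤ 0 inside Pre_: both slices are empty, and B's buffers keep 0 elements
      have hk0 : k ≤ 0 := by omega
      have hm0 : (k - 1).toNat = 0 := by omega
      have hlen : (sA pairs).length = pairs.length := PySem.List.length_sorted pairs _ false
      have hplen : (pairs.length : Int) ≤ 1 - k := by
        have hzl : pairs.length = min weights.length weights.tail.length := List.length_zipWith ..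
        have htl : weights.tail.length = weights.length - 1 := List.length_tail
        rcases hk with h | h | h
        · omega
        · omega
        · omega
      have htop : PySem.List.slice (sA pairs) (some (-k + 1)) none = [] := by
        rw [PySem.List.slice_from _ (by omega)]
        apply List.drop_eq_nil_of_le
        omega
      have hbot : PySem.List.slice (sA pairs) none (some (k - 1)) = [] := by
        have hc : k - 1 = -(((1 - k).toNat : Int)) := by omega
        rw [hc, PySem.List.slice_to_neg_natCast (sA pairs) (1 - k).toNat (by omega)]
        have : (sA pairs).length - (1 - k).toNat = 0 := by omega
        simp [this]
      rw [htop, hbot, hm0]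
      simp
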